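-- pv_equiv track=rewrite | github.com/dongzzi101/algorithm | 프로그래머스/1/42862. 체육복/체육복.py | solution
-- ===== SOURCE A (Python) =====
-- def solution(n, lost, reserve):
--     answer = 0
--
--     lost = set(lost)
--     reserve = set(reserve)
--
--     both = lost & reserve
--     lost -= both
--     reserve -= both
--
--     for r in sorted(reserve):
--         if r-1 in lost:
--             lost.remove(r-1)
--         elif r+1 in lost:
--             lost.remove(r+1)
--
--     answer = n - len(lost)
--
--     return answer
-- ===== SOURCE B (Python) =====
-- def solution(n, lost, reserve):
--     # Two-pointer merge over the two sorted, disjoint "really lost" / "really spare" lists.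
--     L = sorted(set(lost) - set(reserve))
--     R = sorted(set(reserve) - set(lost))
--     i = j = matched = 0
--     while i < len(L) and j < len(R):
--         if L[i] < R[j] - 1:
--             i += 1
--         elif L[i] > R[j] + 1:
--             j += 1
--         else:
--             matched += 1
--             i += 1
--             j += 1
--     return n - (len(L) - matched)
-- ===== Notes on version B (the rewrite author's own statement) =====
-- stated objective: alternative
-- what changed: A greedily scans sorted(reserve) doing membership tests and removals on a mutable lost-set; B sorts the two disjoint difference lists once and counts matches with a single two-pointer merge, no set mutation.
import Mathlib
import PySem

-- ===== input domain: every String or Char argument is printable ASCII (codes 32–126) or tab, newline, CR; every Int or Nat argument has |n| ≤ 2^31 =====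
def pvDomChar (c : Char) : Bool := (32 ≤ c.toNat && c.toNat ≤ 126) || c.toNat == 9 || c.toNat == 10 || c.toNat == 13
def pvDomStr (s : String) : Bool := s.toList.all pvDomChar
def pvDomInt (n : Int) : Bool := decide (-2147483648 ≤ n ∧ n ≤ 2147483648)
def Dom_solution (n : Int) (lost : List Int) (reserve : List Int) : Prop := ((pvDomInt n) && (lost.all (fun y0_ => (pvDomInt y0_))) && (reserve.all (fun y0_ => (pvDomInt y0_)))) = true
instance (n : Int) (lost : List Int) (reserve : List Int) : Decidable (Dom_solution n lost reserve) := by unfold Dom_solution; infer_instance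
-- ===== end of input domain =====

-- B replaces A's greedy over a mutable set (membership tests + set.remove per reserve element)
-- by a two-pointer merge of the two sorted disjoint lists; objective: alternative (same cost).

-- ===== PORT A =====
-- A's for-loop over sorted(reserve); Python's set.remove is exact as Set.discard here since it
-- is guarded by the membership test (no KeyError possible).
def solutionLoop : List Int → PySem.Set Int → PySem.Set Int
  | [], lost => lost
  | r :: rs, lost =>
    if r - 1 ∈ lost then solutionLoop rs (PySem.Set.discard lost (r - 1))
    else if r + 1 ∈ lost then solutionLoop rs (PySem.Set.discard lost (r + 1))
    else solutionLoop rs lost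

def solution (n : Int) (lost : List Int) (reserve : List Int) : Int :=
  let lostS : PySem.Set Int := PySem.Set.ofList lost
  let reserveS : PySem.Set Int := PySem.Set.ofList reserve
  let both : PySem.Set Int := PySem.Set.inter lostS reserveS
  let lostS2 : PySem.Set Int := PySem.Set.diff lostS both
  let reserveS2 : PySem.Set Int := PySem.Set.diff reserveS both
  let finalLost : PySem.Set Int := solutionLoop (PySem.List.sorted reserveS2 (fun x => x) false) lostS2
  n - (finalLost.length : Int)

-- ===== PORT B =====
-- B's while-loop: two pointers i over L, j over R, counting matched pairs.
def matchLoop (L R : List Int) (i j : Nat) (matched : Int) : Int :=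
  if h : i < L.length ∧ j < R.length then
    if L[i]'h.1 < R[j]'h.2 - 1 then matchLoop L R (i + 1) j matched
    else if L[i]'h.1 > R[j]'h.2 + 1 then matchLoop L R i (j + 1) matched
    else matchLoop L R (i + 1) (j + 1) (matched + 1)
  else matched
termination_by (L.length - i) + (R.length - j)
decreasing_by all_goals omega

def solution_alt (n : Int) (lost : List Int) (reserve : List Int) : Int :=
  let L : List Int := PySem.List.sorted (PySem.Set.diff (PySem.Set.ofList lost) (PySem.Set.ofList reserve)) (fun x => x) false
  let R : List Int := PySem.List.sorted (PySem.Set.diff (PySem.Set.ofList reserve) (PySem.Set.ofList lost)) (fun x => x) false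
  n - ((L.length : Int) - matchLoop L R 0 0 0)

-- ===== PRECONDITION & SPEC =====
def Spec_solution (n : Int) (lost : List Int) (reserve : List Int) (out : Int) : Prop := out = solution_alt n lost reserve
instance (n : Int) (lost : List Int) (reserve : List Int) (out : Int) : Decidable (Spec_solution n lost reserve out) := by unfold Spec_solution; infer_instance

-- ===== CLAIM (what is proved, stated in full; the proofs are below) =====
def Claim_equal_solution : Prop := ∀ (n : Int) (lost : List Int) (reserve : List Int), Dom_solution n lost reserve → Spec_solution n lost reserve (solution n lost reserve)

-- ===== LEMMAS AND PROOFS =====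

-- proof-side recursive form of B's two-pointer loop, consuming the lists
def mList : List Int → List Int → Int
  | [], _ => 0
  | _ :: _, [] => 0
  | l :: L, r :: R =>
    if l < r - 1 then mList L (r :: R)
    else if l > r + 1 then mList (l :: L) R
    else 1 + mList L R
termination_by L R => L.length + R.length
decreasing_by all_goals (simp only [List.length_cons]; omega)

lemma mList_nil_right (L : List Int) : mList L [] = 0 := by
  cases L <;> simp [mList]

lemma matchLoop_eq (L R : List Int) (i j : Nat) (acc : Int) :
    matchLoop L R i j acc = acc + mList (L.drop i) (R.drop j) := by
  fun_induction matchLoop L R i j acc with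
  | case1 i j acc h hlt ih =>
      rw [ih, List.drop_eq_getElem_cons h.1, List.drop_eq_getElem_cons h.2]
      simp only [mList, if_pos hlt]
  | case2 i j acc h hlt hgt ih =>
      rw [ih, List.drop_eq_getElem_cons h.1, List.drop_eq_getElem_cons h.2]
      simp only [mList, if_neg hlt, if_pos hgt]
  | case3 i j acc h hlt hgt ih =>
      rw [ih, List.drop_eq_getElem_cons h.1, List.drop_eq_getElem_cons h.2]
      simp only [mList, if_neg hlt, if_neg hgt]
      ring
  | case4 i j acc h =>
      rcases Decidable.not_and_iff_or_not.mp h with h' | h'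
      · rw [List.drop_eq_nil_of_le (by omega)]; simp [mList]
      · rw [List.drop_eq_nil_of_le (as := R) (by omega), mList_nil_right]; simp

lemma solutionLoop_nil (R : List Int) : solutionLoop R [] = [] := by
  induction R with
  | nil => rfl
  | cons r rs ih => simp [solutionLoop, ih]

lemma solutionLoop_perm (R : List Int) (L L' : PySem.Set Int) (h : L.Perm L') :
    (solutionLoop R L).Perm (solutionLoop R L') := by
  induction R generalizing L L' with
  | nil => exact h
  | cons r rs ih =>
      simp only [solutionLoop, PySem.Set.discard]
      by_cases h1 : r - 1 ∈ L
      · rw [if_pos h1, if_pos (h.mem_iff.mp h1)]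
        exact ih _ _ (h.filter _)
      · rw [if_neg h1, if_neg (fun c => h1 (h.mem_iff.mpr c))]
        by_cases h2 : r + 1 ∈ L
        · rw [if_pos h2, if_pos (h.mem_iff.mp h2)]
          exact ih _ _ (h.filter _)
        · rw [if_neg h2, if_neg (fun c => h2 (h.mem_iff.mpr c))]
          exact ih _ _ h

lemma solutionLoop_cons_lt (R : List Int) (l : Int) (L : PySem.Set Int)
    (h : ∀ r ∈ R, l + 1 < r) :
    solutionLoop R (l :: L) = l :: solutionLoop R L := by
  induction R generalizing L with
  | nil => rfl
  | cons r rs ih =>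
      have hr := h r (List.mem_cons_self ..)
      have htail : ∀ r' ∈ rs, l + 1 < r' := fun r' hr' => h r' (List.mem_cons_of_mem _ hr')
      have hne1 : l ≠ r - 1 := by omega
      have hne2 : l ≠ r + 1 := by omega
      have e1 : PySem.Set.discard (l :: L) (r - 1) = l :: PySem.Set.discard L (r - 1) := by
        simp [PySem.Set.discard, hne1]
      have e2 : PySem.Set.discard (l :: L) (r + 1) = l :: PySem.Set.discard L (r + 1) := by
        simp [PySem.Set.discard, hne2]
      simp only [solutionLoop]
      by_cases h1 : r - 1 ∈ L
      · rw [if_pos (List.mem_cons_of_mem _ h1), if_pos h1, e1, ih _ htail]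
      · rw [if_neg (by simp [List.mem_cons, Ne.symm hne1, h1]), if_neg h1]
        by_cases h2 : r + 1 ∈ L
        · rw [if_pos (List.mem_cons_of_mem _ h2), if_pos h2, e2, ih _ htail]
        · rw [if_neg (by simp [List.mem_cons, Ne.symm hne2, h2]), if_neg h2, ih _ htail]

lemma discard_cons_self (l : Int) (L : List Int) (h : l ∉ L) :
    PySem.Set.discard (l :: L) l = L := by
  simp only [PySem.Set.discard, List.filter_cons, beq_self_eq_true, Bool.not_true,
    Bool.false_eq_true, if_false]
  apply List.filter_eq_self.mpr
  intro y hy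
  simp only [Bool.not_eq_true', beq_eq_false_iff_ne, ne_eq]
  exact fun e => h (e ▸ hy)

lemma solutionLoop_length : ∀ (L R : List Int),
    L.Pairwise (· < ·) → R.Pairwise (· < ·) → (∀ x ∈ L, x ∉ R) →
    ((solutionLoop R L).length : Int) = (L.length : Int) - mList L R
  | [], R, _, _, _ => by
      rw [solutionLoop_nil]; cases R <;> simp [mList]
  | l :: L, [], _, _, _ => by
      simp [solutionLoop, mList_nil_right]
  | l :: L, r :: R, hL, hR, hdisj => by
      have hLhead : ∀ x ∈ L, l < x := (List.pairwise_cons.mp hL).1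
      have hRhead : ∀ x ∈ R, r < x := (List.pairwise_cons.mp hR).1
      have hlr : l ≠ r := fun e =>
        hdisj l (List.mem_cons_self ..) (e ▸ List.mem_cons_self ..)
      by_cases hc1 : l < r - 1
      · have hall : ∀ r' ∈ r :: R, l + 1 < r' := by
          intro r' hr'
          rcases List.mem_cons.mp hr' with e | hm
          · omega
          · have := hRhead r' hm; omega
        have ih := solutionLoop_length L (r :: R) hL.of_cons hR
          (fun x hx => hdisj x (List.mem_cons_of_mem _ hx))
        rw [solutionLoop_cons_lt _ _ _ hall]
        simp only [List.length_cons, mList, if_pos hc1]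
        push_cast
        omega
      · by_cases hc2 : l > r + 1
        · have h1 : r - 1 ∉ l :: L := by
            intro hm
            rcases List.mem_cons.mp hm with e | hm'
            · omega
            · have := hLhead _ hm'; omega
          have h2 : r + 1 ∉ l :: L := by
            intro hm
            rcases List.mem_cons.mp hm with e | hm'
            · omega
            · have := hLhead _ hm'; omega
          have ih := solutionLoop_length (l :: L) R hL hR.of_cons
            (fun x hx hxR => hdisj x hx (List.mem_cons_of_mem _ hxR))
          simp only [solutionLoop, if_neg h1, if_neg h2]
          simp only [mList, if_neg hc1, if_pos hc2]
          exact ih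
        · -- l = r - 1 or l = r + 1
          have hlL : l ∉ L := fun hm => lt_irrefl l (hLhead l hm)
          have ih := solutionLoop_length L R hL.of_cons hR.of_cons
            (fun x hx hxR =>
              hdisj x (List.mem_cons_of_mem _ hx) (List.mem_cons_of_mem _ hxR))
          have hcases : l = r - 1 ∨ l = r + 1 := by omega
          rcases hcases with e | e
          · have h1 : r - 1 ∈ l :: L := by rw [← e]; exact List.mem_cons_self ..
            have hd : PySem.Set.discard (l :: L) (r - 1) = L := by
              rw [← e]; exact discard_cons_self l L hlL
            simp only [solutionLoop, if_pos h1, hd]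
            simp only [mList, if_neg hc1, if_neg hc2, List.length_cons]
            push_cast
            omega
          · have h1 : r - 1 ∉ l :: L := by
              intro hm
              rcases List.mem_cons.mp hm with e' | hm'
              · omega
              · have := hLhead _ hm'; omega
            have h2 : r + 1 ∈ l :: L := by rw [← e]; exact List.mem_cons_self ..
            have hd : PySem.Set.discard (l :: L) (r + 1) = L := by
              rw [← e]; exact discard_cons_self l L hlL
            simp only [solutionLoop, if_neg h1, if_pos h2, hd]
            simp only [mList, if_neg hc1, if_neg hc2, List.length_cons]
            push_cast
            omega
termination_by L R => L.length + R.length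

lemma diff_inter_left (s t : PySem.Set Int) :
    PySem.Set.diff s (PySem.Set.inter s t) = PySem.Set.diff s t := by
  unfold PySem.Set.diff
  apply List.filter_congr
  intro x hx
  have : (PySem.Set.inter s t).contains x = t.contains x := by
    rw [Bool.eq_iff_iff, PySem.Set.contains_iff, PySem.Set.contains_iff, PySem.Set.mem_inter]
    exact ⟨fun h => h.2, fun h => ⟨hx, h⟩⟩
  rw [this]

lemma diff_inter_right (s t : PySem.Set Int) :
    PySem.Set.diff t (PySem.Set.inter s t) = PySem.Set.diff t s := by
  unfold PySem.Set.diff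
  apply List.filter_congr
  intro x hx
  have : (PySem.Set.inter s t).contains x = s.contains x := by
    rw [Bool.eq_iff_iff, PySem.Set.contains_iff, PySem.Set.contains_iff, PySem.Set.mem_inter]
    exact ⟨fun h => h.1, fun h => ⟨h, hx⟩⟩
  rw [this]

-- ===== VERDICT (by name: the statement is the Claim_ definition above) =====
theorem solution_spec : Claim_equal_solution := by
  intro n lost reserve _
  simp only [Spec_solution, solution, solution_alt]
  rw [diff_inter_left, diff_inter_right]
  set LB := PySem.Set.diff (PySem.Set.ofList lost) (PySem.Set.ofList reserve) with hLBdef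
  set RB := PySem.Set.diff (PySem.Set.ofList reserve) (PySem.Set.ofList lost) with hRBdef
  set Ls := PySem.List.sorted LB (fun x => x) false with hLsdef
  set Rs := PySem.List.sorted RB (fun x => x) false with hRsdef
  have hLperm : Ls.Perm LB := PySem.List.sorted_perm _ _ _
  have hRperm : Rs.Perm RB := PySem.List.sorted_perm _ _ _
  have hLsnd : Ls.Nodup :=
    hLperm.nodup_iff.mpr (PySem.Set.nodup_diff _ _ (PySem.Set.nodup_ofList lost))
  have hRsnd : Rs.Nodup :=
    hRperm.nodup_iff.mpr (PySem.Set.nodup_diff _ _ (PySem.Set.nodup_ofList reserve))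
  have hLpw : Ls.Pairwise (· < ·) :=
    ((PySem.List.sorted_pairwise LB (fun x => x)).and hLsnd).imp
      (fun h => lt_of_le_of_ne h.1 h.2)
  have hRpw : Rs.Pairwise (· < ·) :=
    ((PySem.List.sorted_pairwise RB (fun x => x)).and hRsnd).imp
      (fun h => lt_of_le_of_ne h.1 h.2)
  have hdisj : ∀ x ∈ Ls, x ∉ Rs := by
    intro x hx hxR
    have h1 := (PySem.Set.mem_diff _ _ x).mp (hLperm.mem_iff.mp hx)
    have h2 := (PySem.Set.mem_diff _ _ x).mp (hRperm.mem_iff.mp hxR)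
    exact h1.2 h2.1
  have hperm2 : (solutionLoop Rs LB).Perm (solutionLoop Rs Ls) :=
    solutionLoop_perm Rs LB Ls hLperm.symm
  rw [matchLoop_eq]
  simp only [List.drop_zero, zero_add]
  rw [show ((solutionLoop Rs LB).length : Int) = ((solutionLoop Rs Ls).length : Int) by
        exact_mod_cast hperm2.length_eq,
      solutionLoop_length Ls Rs hLpw hRpw hdisj]
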